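-- pv_equiv track=rewrite | github.com/AndrewZoldy/lecture3 | exercise1.py | kmer_hashing
-- ===== SOURCE A (Python) =====
-- def nucl_to_number(nucl):
--     a = 1
--     t = 2
--     g = 3
--     c = 0
--     if nucl == 'A':
--         number = a
--     elif nucl == 'T':
--         number = t
--     elif nucl == 'G':
--         number = g
--     elif nucl == 'C':
--         number = c
--     else:
--         raise Exception('Wrong character in sequence: {}'.format(nucl))
--     return number
--
-- def kmer_hashing(kmer):
--     hash = 0
--     multiplier = 1
--     for index, nucleotide in enumerate(kmer[::-1]):
--         number = str(nucl_to_number(nucleotide))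
--         if index > 0:
--             multiplier = multiplier * 4
--         hash += int(number) * multiplier
--     return hash
-- ===== SOURCE B (Python) =====
-- def kmer_hashing(kmer):
--     values = {'A': 1, 'T': 2, 'G': 3, 'C': 0}
--     result = 0
--     for ch in kmer:
--         result = result * 4 + values[ch]
--     return result
-- ===== Notes on version B (the rewrite author's own statement) =====
-- stated objective: simpler
-- what changed: Replaces the reversed-string loop with an explicit power-of-4 multiplier by a single forward Horner fold (result = result*4 + digit) over a lookup table.
import Mathlib
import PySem

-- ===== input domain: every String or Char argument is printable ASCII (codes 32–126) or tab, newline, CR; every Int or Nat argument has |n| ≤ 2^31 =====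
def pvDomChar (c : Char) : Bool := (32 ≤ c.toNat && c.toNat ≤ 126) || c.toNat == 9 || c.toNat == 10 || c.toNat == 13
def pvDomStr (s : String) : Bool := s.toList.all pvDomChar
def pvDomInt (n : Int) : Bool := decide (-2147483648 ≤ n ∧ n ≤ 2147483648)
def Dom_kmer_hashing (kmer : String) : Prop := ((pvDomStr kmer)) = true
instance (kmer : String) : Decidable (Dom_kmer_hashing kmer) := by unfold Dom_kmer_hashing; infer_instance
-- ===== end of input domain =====

-- B replaces A's reversed traversal with an explicit multiplier by a forward Horner fold over a lookup table (objective: simpler).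
-- ===== PORT A =====
-- nucl_to_number: raises on any character other than A/T/G/C → none
def nuclToNumber (nucl : Char) : Option Int :=
  if nucl = 'A' then some 1
  else if nucl = 'T' then some 2
  else if nucl = 'G' then some 3
  else if nucl = 'C' then some 0
  else none

-- the for-loop over enumerate(kmer[::-1]); the loop index is the Nat argument; none = the raise propagating
def kmerLoopA : List Char → Nat → Int → Int → Option Int
  | [], _, _, hash => some hash
  | nucleotide :: rest, index, multiplier, hash =>
    match nuclToNumber nucleotide with
    | none => none
    | some n =>
      let number := PySem.Int.toStr n            -- str(nucl_to_number(nucleotide))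
      let multiplier := if index > 0 then multiplier * 4 else multiplier
      kmerLoopA rest (index + 1) multiplier
        (hash + ((PySem.Int.ofStr? number).getD 0) * multiplier)   -- int(number); never fails here

def kmer_hashing (kmer : String) : Int :=
  -- kmer[::-1] is the reversed character list; .getD 0 only reached where Python raises (outside Pre_)
  (kmerLoopA kmer.toList.reverse 0 1 0).getD 0

-- ===== PORT B =====
def kmer_hashing_alt (kmer : String) : Int :=
  let values : PySem.Dict Char Int :=
    PySem.Dict.ofList [('A', 1), ('T', 2), ('G', 3), ('C', 0)]
  -- values[ch] raises KeyError on other characters (outside Pre_); .getD 0 there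
  kmer.toList.foldl (fun result ch => result * 4 + (values.get? ch).getD 0) 0

-- ===== PRECONDITION & SPEC =====
-- Pre_ excludes exactly the strings containing a character other than A/T/G/C, on which Python A raises.
def Pre_kmer_hashing (kmer : String) : Prop :=
  (kmer.toList.all (fun c => c == 'A' || c == 'T' || c == 'G' || c == 'C')) = true
instance (kmer : String) : Decidable (Pre_kmer_hashing kmer) := by
  unfold Pre_kmer_hashing; infer_instance

def pvWitness_kmer_hashing : String := "AT"

def Spec_kmer_hashing (kmer : String) (out : Int) : Prop := out = kmer_hashing_alt kmer
instance (kmer : String) (out : Int) : Decidable (Spec_kmer_hashing kmer out) := by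
  unfold Spec_kmer_hashing; infer_instance

-- ===== CLAIM (what is proved, stated in full; the proofs are below) =====
def Claim_equal_kmer_hashing : Prop := ∀ (kmer : String), Dom_kmer_hashing kmer → Pre_kmer_hashing kmer → Spec_kmer_hashing kmer (kmer_hashing kmer)

-- ===== LEMMAS AND PROOFS =====

-- proof-only total digit function (agrees with both ports on valid characters)
def digit (c : Char) : Int :=
  if c = 'A' then 1 else if c = 'T' then 2 else if c = 'G' then 3 else 0

-- little-endian value of a character list
def lval : List Char → Int
  | [] => 0
  | c :: cs => digit c + 4 * lval cs

def Valid (l : List Char) : Prop := ∀ c ∈ l, c = 'A' ∨ c = 'T' ∨ c = 'G' ∨ c = 'C'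

lemma nucl_eval {c : Char} (h : c = 'A' ∨ c = 'T' ∨ c = 'G' ∨ c = 'C') :
    nuclToNumber c = some (digit c) ∧
      (PySem.Int.ofStr? (PySem.Int.toStr (digit c))).getD 0 = digit c := by
  rcases h with h | h | h | h <;> subst h <;> exact ⟨rfl, by decide⟩

lemma kmerLoopA_pos (cs : List Char) (hv : Valid cs) :
    ∀ (i : Nat) (m h : Int), 1 ≤ i →
      kmerLoopA cs i m h = some (h + 4 * m * lval cs) := by
  induction cs with
  | nil => intro i m h _; simp [kmerLoopA, lval]
  | cons c rest ih =>
    intro i m h hi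
    have hc := nucl_eval (hv c (by simp))
    have hrest : Valid rest := fun x hx => hv x (by simp [hx])
    simp only [kmerLoopA, hc.1]
    have hgt : i > 0 := hi
    rw [if_pos hgt]
    rw [ih hrest (i + 1) (m * 4) _ (by omega), hc.2, lval]
    ring_nf

lemma kmerA_eq_lval (l : List Char) (hv : Valid l) :
    (kmerLoopA l 0 1 0).getD 0 = lval l := by
  cases l with
  | nil => simp [kmerLoopA, lval]
  | cons c rest =>
    have hc := nucl_eval (hv c (by simp))
    have hrest : Valid rest := fun x hx => hv x (by simp [hx])
    simp only [kmerLoopA, hc.1]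
    rw [if_neg (by omega)]
    rw [kmerLoopA_pos rest hrest 1 1 _ le_rfl, hc.2, lval]
    simp only [Option.getD_some, lval]; ring

lemma lookup_eval {c : Char} (h : c = 'A' ∨ c = 'T' ∨ c = 'G' ∨ c = 'C') :
    ((PySem.Dict.ofList [('A', (1:Int)), ('T', 2), ('G', 3), ('C', 0)]).get? c).getD 0
      = digit c := by
  rcases h with h | h | h | h <;> subst h <;> decide

lemma hornerB (l : List Char) (hv : Valid l) : ∀ a : Int,
    l.foldl (fun result ch =>
        result * 4 +
          ((PySem.Dict.ofList [('A', (1:Int)), ('T', 2), ('G', 3), ('C', 0)]).get? ch).getD 0) a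
      = a * 4 ^ l.length + lval l.reverse := by
  induction l with
  | nil => intro a; simp [lval]
  | cons c rest ih =>
    intro a
    have hrest : Valid rest := fun x hx => hv x (by simp [hx])
    have happ : ∀ xs : List Char, lval (xs ++ [c]) = lval xs + digit c * 4 ^ xs.length := by
      intro xs
      induction xs with
      | nil => simp [lval]
      | cons y ys ihy => simp [lval, ihy, pow_succ]; ring
    simp only [List.foldl_cons, List.reverse_cons, List.length_cons]
    rw [ih hrest, lookup_eval (hv c (by simp)), happ]
    simp [pow_succ, List.length_reverse]
    ring

-- ===== VERDICT (by name: the statement is the Claim_ definition above) =====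
theorem kmer_hashing_spec : Claim_equal_kmer_hashing := by
  intro kmer _ hpre
  unfold Spec_kmer_hashing kmer_hashing kmer_hashing_alt
  have hv : Valid kmer.toList := by
    intro c hc
    have := List.all_eq_true.mp hpre c hc
    simpa [Valid, or_assoc] using this
  have hvrev : Valid kmer.toList.reverse := fun c hc => hv c (List.mem_reverse.mp hc)
  rw [kmerA_eq_lval _ hvrev, hornerB _ hv 0]
  simp
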